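-- pv_equiv track=rewrite | github.com/Schreipfelerer/AdventOfCode | 2021_python/Day19/Part1.py | parseInput
-- ===== SOURCE A (Python) =====
-- def parseInput(lines):  # parses the input to the desired typ
--     data = []
--     scanner = []
--     for line in lines:
--         if not line.rstrip("\n"):
--             data.append(scanner)
--             scanner = []
--         elif not line.rstrip("\n").startswith("---"):
--             pos = []
--             for num in line.rstrip("\n").split(","):
--                 pos.append(int(num))
--             scanner.append(pos)
--     data.append(scanner)
--     return data
-- ===== SOURCE B (Python) =====
-- def parseInput(lines):
--     stripped = [l.rstrip("\n") for l in lines]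
--     cuts = [i for i, s in enumerate(stripped) if not s]
--     bounds = zip([-1] + cuts, cuts + [len(stripped)])
--     return [_parseBlock(stripped[a + 1:b]) for a, b in bounds]
--
-- def _parseBlock(block):
--     return [[int(x) for x in row.split(",")] for row in block if not row.startswith("---")]
-- ===== Notes on version B (the rewrite author's own statement) =====
-- stated objective: alternative
-- what changed: A builds the result in one interleaved loop that accumulates a current scanner and flushes it at each blank line; B is two separate phases: it strips all lines, computes the blank-line cut positions with enumerate, and then slices the stripped list between consecutive cuts, parsing each block with a filter-and-map comprehension.
import Mathlib
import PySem

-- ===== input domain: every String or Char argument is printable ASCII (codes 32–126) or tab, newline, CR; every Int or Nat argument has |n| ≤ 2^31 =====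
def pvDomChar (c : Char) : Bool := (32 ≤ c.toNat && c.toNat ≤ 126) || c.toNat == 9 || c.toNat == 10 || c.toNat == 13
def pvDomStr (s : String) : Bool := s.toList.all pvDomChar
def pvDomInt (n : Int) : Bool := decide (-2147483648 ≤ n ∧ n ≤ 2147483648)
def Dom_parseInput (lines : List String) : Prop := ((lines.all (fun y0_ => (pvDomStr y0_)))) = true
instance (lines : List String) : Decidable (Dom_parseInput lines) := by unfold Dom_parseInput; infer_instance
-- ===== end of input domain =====

-- B replaces A's interleaved accumulator loop by two phases: collect the blank-line cut
-- positions, then slice the stripped lines between consecutive cuts and parse each block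
-- with a comprehension ("alternative" objective; same asymptotic cost).

-- ===== PORT A =====
-- exact port of str.rstrip("\n"): remove trailing '\n' characters
def pvRstripNl (cs : List Char) : List Char := (cs.reverse.dropWhile (fun c => c == '\n')).reverse

-- inner loop of A: pos = []; for num in line.rstrip("\n").split(","): pos.append(int(num))
def pvRowA (s : List Char) : List Int :=
  (PySem.Chars.splitOn s [',']).foldl (fun ps num => ps ++ [(PySem.Int.ofChars? num).getD 0]) []

def pvStepA (acc : List (List (List Int)) × List (List Int)) (line : String) :
    List (List (List Int)) × List (List Int) :=
  let s := pvRstripNl line.toList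
  if s = [] then (acc.1 ++ [acc.2], [])
  else if PySem.Chars.startswith s ['-', '-', '-'] then acc
  else (acc.1, acc.2 ++ [pvRowA s])

def parseInput (lines : List String) : List (List (List Int)) :=
  let st := lines.foldl pvStepA ([], [])
  st.1 ++ [st.2]

-- ===== PORT B =====
-- [int(x) for x in row.split(",")]
def pvRowB (s : List Char) : List Int :=
  (PySem.Chars.splitOn s [',']).map (fun x => (PySem.Int.ofChars? x).getD 0)

-- _parseBlock: comprehension filtering the '---' header lines
def pvParseBlock (b : List (List Char)) : List (List Int) :=
  (b.filter (fun s => !(PySem.Chars.startswith s ['-', '-', '-']))).map pvRowB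

def parseInput_alt (lines : List String) : List (List (List Int)) :=
  let stripped := lines.map (fun l => pvRstripNl l.toList)
  let cuts := ((PySem.List.enumerate stripped).filter (fun p => decide (p.2 = []))).map Prod.fst
  let bounds := List.zip ((-1 : Int) :: cuts) (cuts ++ [(stripped.length : Int)])
  bounds.map (fun ab => pvParseBlock (PySem.List.slice stripped (some (ab.1 + 1)) (some ab.2)))

-- ===== PRECONDITION & SPEC =====
-- Pre_ excludes exactly the inputs on which Python A raises ValueError: a line that, after
-- stripping trailing newlines, is non-blank, does not start with "---", and has a
-- comma-separated piece that int() cannot parse.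
def Pre_parseInput (lines : List String) : Prop :=
  ∀ l ∈ lines, pvRstripNl l.toList ≠ [] →
    PySem.Chars.startswith (pvRstripNl l.toList) ['-', '-', '-'] = false →
    ∀ p ∈ PySem.Chars.splitOn (pvRstripNl l.toList) [','], (PySem.Int.ofChars? p).isSome = true
instance (lines : List String) : Decidable (Pre_parseInput lines) := by
  unfold Pre_parseInput; infer_instance

def pvWitness_parseInput : List String :=
  ["--- scanner 0 ---\n", "1,2,3\n", "-4,5,6\n", "\n", "--- scanner 1 ---\n", "7,8,9"]

def Spec_parseInput (lines : List String) (out : List (List (List Int))) : Prop := out = parseInput_alt lines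
instance (lines : List String) (out : List (List (List Int))) : Decidable (Spec_parseInput lines out) := by unfold Spec_parseInput; infer_instance

-- ===== CLAIM (what is proved, stated in full; the proofs are below) =====
def Claim_equal_parseInput : Prop := ∀ (lines : List String), Dom_parseInput lines → Pre_parseInput lines → Spec_parseInput lines (parseInput lines)

-- ===== LEMMAS AND PROOFS =====

-- proof-side specification: split a stripped line list into blocks at blank lines
def pvSplitBlanks : List (List Char) → List (List (List Char))
  | [] => [[]]
  | s :: t =>
    if s = [] then [] :: pvSplitBlanks t
    else
      match pvSplitBlanks t with
      | r :: rs => (s :: r) :: rs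
      | [] => [[s]]

-- proof-side: the blank positions, as naturals
def pvNcuts : List (List Char) → List Nat
  | [] => []
  | s :: t => (if s = [] then [0] else []) ++ (pvNcuts t).map (· + 1)

-- proof-side: B's slicing, at the Nat level
def pvBlocksN (ss : List (List Char)) : List (List (List Char)) :=
  (List.zip (0 :: (pvNcuts ss).map (· + 1)) (pvNcuts ss ++ [ss.length])).map
    (fun ab => (ss.drop ab.1).take (ab.2 - ab.1))

def pvConsH (scanner : List (List Int)) : List (List (List Int)) → List (List (List Int))
  | [] => [scanner]
  | h :: t => (scanner ++ h) :: t

theorem pvSplitBlanks_ne_nil (ss : List (List Char)) : pvSplitBlanks ss ≠ [] := by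
  cases ss with
  | nil => simp [pvSplitBlanks]
  | cons s t =>
    simp only [pvSplitBlanks]
    split_ifs
    · simp
    · cases h : pvSplitBlanks t <;> simp

theorem pvRowA_eq_pvRowB (s : List Char) : pvRowA s = pvRowB s := by
  unfold pvRowA pvRowB
  generalize PySem.Chars.splitOn s [','] = l
  induction l using List.reverseRecOn with
  | nil => simp
  | append_singleton xs x ih => simp [ih]

-- A's fold, run from any state, is `data` followed by `scanner` merged into the parsed blocks
theorem pvFoldA_eq (lines : List String) :
    ∀ (data : List (List (List Int))) (scanner : List (List Int)),
      (lines.foldl pvStepA (data, scanner)).1 ++ [(lines.foldl pvStepA (data, scanner)).2] =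
        data ++ pvConsH scanner ((pvSplitBlanks (lines.map (fun l => pvRstripNl l.toList))).map pvParseBlock) := by
  induction lines with
  | nil => intro data scanner; simp [pvSplitBlanks, pvConsH, pvParseBlock]
  | cons l t ih =>
    intro data scanner
    simp only [List.foldl_cons, List.map_cons]
    obtain ⟨r, rs, hr⟩ : ∃ r rs, pvSplitBlanks (t.map (fun l => pvRstripNl l.toList)) = r :: rs := by
      cases h : pvSplitBlanks (t.map (fun l => pvRstripNl l.toList)) with
      | nil => exact absurd h (pvSplitBlanks_ne_nil _)
      | cons r rs => exact ⟨r, rs, rfl⟩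
    by_cases hb : pvRstripNl l.toList = []
    · rw [show pvStepA (data, scanner) l = (data ++ [scanner], []) by
        simp [pvStepA, hb]]
      rw [ih]
      simp [pvSplitBlanks, hb, hr, pvConsH, pvParseBlock]
    · by_cases hs : PySem.Chars.startswith (pvRstripNl l.toList) ['-', '-', '-'] = true
      · rw [show pvStepA (data, scanner) l = (data, scanner) by
          simp [pvStepA, hb, hs]]
        rw [ih]
        simp only [pvSplitBlanks, if_neg hb, hr]
        simp [pvConsH, pvParseBlock, hs]
      · rw [show pvStepA (data, scanner) l = (data, scanner ++ [pvRowA (pvRstripNl l.toList)]) by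
          simp [pvStepA, hb, hs]]
        rw [ih]
        simp only [pvSplitBlanks, if_neg hb, hr]
        simp [pvConsH, pvParseBlock, hs, pvRowA_eq_pvRowB, List.append_assoc]

-- the enumerate-filter cut list is pvNcuts, shifted by the start
theorem pvCuts_eq (ss : List (List Char)) :
    ∀ (k : Int), ((PySem.List.enumerate ss k).filter (fun p => decide (p.2 = []))).map Prod.fst =
      (pvNcuts ss).map (fun (n : Nat) => (n : Int) + k) := by
  induction ss with
  | nil => intro k; simp [PySem.List.enumerate, pvNcuts]
  | cons s t ih =>
    intro k
    rw [PySem.List.enumerate_cons]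
    by_cases hs : s = []
    · subst hs
      simp only [pvNcuts, List.filter_cons, decide_eq_true_eq, List.map_cons,
        List.singleton_append, List.map_map, reduceIte, ih (k + 1)]
      refine List.cons_eq_cons.mpr ⟨by ring, ?_⟩
      apply List.map_congr_left; intro a _
      simp [Function.comp]; ring
    · simp only [pvNcuts, List.filter_cons, decide_eq_true_eq, if_neg hs,
        List.nil_append, List.map_map, ih (k + 1)]
      apply List.map_congr_left; intro a _
      simp [Function.comp]; ring

theorem pvNoBlank (t : List (List Char)) (h : pvNcuts t = []) : pvSplitBlanks t = [t] := by
  induction t with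
  | nil => simp [pvSplitBlanks]
  | cons s t ih =>
    simp only [pvNcuts] at h
    by_cases hs : s = []
    · simp [hs] at h
    · simp only [if_neg hs, List.nil_append, List.map_eq_nil_iff] at h
      simp [pvSplitBlanks, if_neg hs, ih h]

-- shifting both cut lists by one and consing a head line shifts every slice
theorem pvShift (s : List Char) (t : List (List Char)) (l1 l2 : List Nat) :
    (List.zip (l1.map (· + 1)) (l2.map (· + 1))).map
        (fun ab => ((s :: t).drop ab.1).take (ab.2 - ab.1)) =
      (List.zip l1 l2).map (fun ab => (t.drop ab.1).take (ab.2 - ab.1)) := by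
  rw [List.zip_map, List.map_map]
  apply List.map_congr_left; intro ab _
  simp [Function.comp, Prod.map, List.drop_succ_cons, Nat.succ_sub_succ]

-- the Nat-level slicing produces exactly the blocks of pvSplitBlanks
theorem pvBlocksN_eq (ss : List (List Char)) : pvBlocksN ss = pvSplitBlanks ss := by
  induction ss with
  | nil => simp [pvBlocksN, pvNcuts, pvSplitBlanks]
  | cons s t ih =>
    by_cases hs : s = []
    · subst hs
      unfold pvBlocksN at ih ⊢
      simp only [pvNcuts, reduceIte, List.nil_append, List.map_cons,
        List.length_cons, List.map_map, List.cons_append, List.zip_cons_cons, List.map_cons]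
      rw [show ((0 + 1 : Nat) :: (pvNcuts t).map ((fun x => x + 1) ∘ (fun x => x + 1))) =
          ((0 : Nat) :: (pvNcuts t).map (· + 1)).map (· + 1) by simp [List.map_map]]
      rw [show ((pvNcuts t).map (· + 1) ++ [t.length + 1]) = ((pvNcuts t ++ [t.length]).map (· + 1)) by simp]
      rw [pvShift, ih]
      simp [pvSplitBlanks]
    · unfold pvBlocksN at ih ⊢
      simp only [pvNcuts, if_neg hs, List.nil_append, List.map_map, List.length_cons]
      cases hc : pvNcuts t with
      | nil =>
        simp only [List.map_nil, List.nil_append, List.zip_cons_cons, List.zip_nil_right,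
          List.map_cons, List.map_nil]
        simp only [pvSplitBlanks, if_neg hs, pvNoBlank t hc]
        simp
      | cons c0 cs =>
        simp only [List.map_cons, List.cons_append, List.zip_cons_cons, List.map_cons,
          Function.comp_apply] at ih ⊢
        rw [show ((c0 + 1 + 1) :: cs.map ((fun x => x + 1) ∘ (fun x => x + 1))) =
            (((c0 + 1) :: cs.map (· + 1)).map (· + 1)) by simp [List.map_map]]
        rw [show (cs.map (· + 1) ++ [t.length + 1]) = ((cs ++ [t.length]).map (· + 1)) by simp]
        rw [pvShift]
        simp only [pvSplitBlanks, if_neg hs]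
        rw [← ih, hc]
        simp [List.zip_cons_cons]

-- cast bridge: B's Int-level zip of slices is the Nat-level pvBlocksN
theorem pvSliceZip (ss : List (List Char)) :
    (List.zip ((-1 : Int) :: (pvNcuts ss).map (fun (n : Nat) => (n : Int))) ((pvNcuts ss).map (fun (n : Nat) => (n : Int)) ++ [(ss.length : Int)])).map
        (fun ab => PySem.List.slice ss (some (ab.1 + 1)) (some ab.2)) = pvBlocksN ss := by
  unfold pvBlocksN
  rw [show ((-1 : Int) :: (pvNcuts ss).map (fun (n : Nat) => (n : Int))) =
      (0 :: (pvNcuts ss).map (· + 1)).map (fun (n : Nat) => (n : Int) - 1) by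
    simp only [List.map_cons, List.map_map]
    refine List.cons_eq_cons.mpr ⟨by norm_num, ?_⟩
    apply List.map_congr_left; intro a _; simp [Function.comp]]
  rw [show ((pvNcuts ss).map (fun (n : Nat) => (n : Int)) ++ [(ss.length : Int)]) =
      (pvNcuts ss ++ [ss.length]).map (fun (n : Nat) => (n : Int)) by simp]
  rw [List.zip_map, List.map_map]
  apply List.map_congr_left; intro ab _
  show PySem.List.slice ss (some ((ab.1 : Int) - 1 + 1)) (some (ab.2 : Int)) = _
  rw [show ((ab.1 : Int) - 1 + 1) = ((ab.1 : Nat) : Int) by ring, PySem.List.slice_natCast]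

-- ===== VERDICT (by name: the statement is the Claim_ definition above) =====
theorem parseInput_spec : Claim_equal_parseInput := by
  intro lines _ _
  show parseInput lines = parseInput_alt lines
  simp only [parseInput, parseInput_alt]
  rw [pvFoldA_eq lines [] []]
  set ss := lines.map (fun l => pvRstripNl l.toList) with hss
  rw [show ((PySem.List.enumerate ss).filter (fun p => decide (p.2 = []))).map Prod.fst =
      (pvNcuts ss).map (fun (n : Nat) => (n : Int)) by
    rw [pvCuts_eq ss 0]; apply List.map_congr_left; intro a _; ring]
  rw [show (List.zip ((-1 : Int) :: (pvNcuts ss).map (fun (n : Nat) => (n : Int))) ((pvNcuts ss).map (fun (n : Nat) => (n : Int)) ++ [(ss.length : Int)])).map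
        (fun ab => pvParseBlock (PySem.List.slice ss (some (ab.1 + 1)) (some ab.2))) =
      ((List.zip ((-1 : Int) :: (pvNcuts ss).map (fun (n : Nat) => (n : Int))) ((pvNcuts ss).map (fun (n : Nat) => (n : Int)) ++ [(ss.length : Int)])).map
        (fun ab => PySem.List.slice ss (some (ab.1 + 1)) (some ab.2))).map pvParseBlock by
    rw [List.map_map]; rfl]
  rw [pvSliceZip, pvBlocksN_eq]
  obtain ⟨r, rs, hr⟩ : ∃ r rs, pvSplitBlanks ss = r :: rs := by
    cases h : pvSplitBlanks ss with
    | nil => exact absurd h (pvSplitBlanks_ne_nil _)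
    | cons r rs => exact ⟨r, rs, rfl⟩
  simp [hr, pvConsH]
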